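-- pv_equiv track=rewrite | github.com/piotrsniady/python-exercises-edabit | medium/loves_me_loves_me_not.py | loves_me
-- ===== SOURCE A (Python) =====
-- from typing import List
--
-- def loves_me(n: int) -> List[str]:
--     lst = []
--     for i in range(n):
--         if i % 2 == 0:
--             lst.append("Loves me")
--         else:
--             lst.append("Loves me not")
--
--     lst[-1] = lst[-1].upper()
--
--     return lst
-- ===== SOURCE B (Python) =====
-- from typing import List
--
-- def loves_me(n: int) -> List[str]:
--     out = []
--     m = n
--     while m > 2:
--         out.append("Loves me")
--         out.append("Loves me not")
--         m -= 2
--     if m == 1: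
--         out.append("LOVES ME")
--     else:
--         out.append("Loves me")
--         out.append("LOVES ME NOT")
--     return out
-- ===== Notes on version B (the rewrite author's own statement) =====
-- stated objective: alternative
-- what changed: Replaces the per-index loop with a parity branch plus a final in-place upper() mutation by a pair-peeling loop (two plain elements per step, no parity test) whose one- or two-element ending is emitted already uppercased.
-- outside the precondition, e.g. on loves_me(0): A raises IndexError, B returns ['Loves me', 'LOVES ME NOT']
import Mathlib
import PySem

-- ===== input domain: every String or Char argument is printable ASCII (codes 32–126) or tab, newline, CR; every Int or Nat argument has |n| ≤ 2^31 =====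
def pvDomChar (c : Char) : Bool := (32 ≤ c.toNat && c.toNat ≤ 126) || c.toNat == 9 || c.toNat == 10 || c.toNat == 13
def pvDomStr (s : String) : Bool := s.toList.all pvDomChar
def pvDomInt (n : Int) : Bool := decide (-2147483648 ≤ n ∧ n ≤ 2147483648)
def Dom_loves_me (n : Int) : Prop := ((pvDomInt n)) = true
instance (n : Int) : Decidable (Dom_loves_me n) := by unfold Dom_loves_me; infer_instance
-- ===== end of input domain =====

-- B replaces the parity-branch loop plus the final in-place upper() mutation by a pair-peeling
-- loop (two elements per step, no parity test) that emits the uppercased ending directly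
-- (alternative, same cost). Return-value equivalence on Pre_; A raises IndexError on n ≤ 0.

-- ===== PORT A =====
def loves_me (n : Int) : List String :=
  let lst := (PySem.List.pyRange 0 n 1).foldl
    (fun acc i =>
      if PySem.Int.mod i 2 = 0 then acc ++ ["Loves me"] else acc ++ ["Loves me not"]) []
  PySem.List.pySetD lst (-1) (PySem.Str.upper (PySem.List.pyGetD lst (-1) ""))

-- ===== PORT B =====
def pvAltLoop (m : Int) (out : List String) : List String × Int :=
  if 2 < m then pvAltLoop (m - 2) (out ++ ["Loves me"] ++ ["Loves me not"])
  else (out, m)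
termination_by m.toNat
decreasing_by omega

def loves_me_alt (n : Int) : List String :=
  let r := pvAltLoop n []
  if r.2 = 1 then r.1 ++ ["LOVES ME"]
  else r.1 ++ ["Loves me"] ++ ["LOVES ME NOT"]

-- ===== PRECONDITION & SPEC =====
-- Pre_ excludes n ≤ 0, where A's lst[-1] raises IndexError on the empty list.
def Pre_loves_me (n : Int) : Prop := 1 ≤ n
instance (n : Int) : Decidable (Pre_loves_me n) := by unfold Pre_loves_me; infer_instance
def pvWitness_loves_me : Int := (5)

def Spec_loves_me (n : Int) (out : List String) : Prop := out = loves_me_alt n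
instance (n : Int) (out : List String) : Decidable (Spec_loves_me n out) := by unfold Spec_loves_me; infer_instance

-- ===== CLAIM (what is proved, stated in full; the proofs are below) =====
def Claim_equal_loves_me : Prop := ∀ (n : Int), Dom_loves_me n → Pre_loves_me n → Spec_loves_me n (loves_me n)

-- ===== LEMMAS AND PROOFS =====

-- the plain alternating row of length k (no uppercasing)
def pvRow (k : Nat) : List String :=
  (List.range k).map (fun j => if j % 2 = 0 then "Loves me" else "Loves me not")

-- the common closed form: row of length k-1, then the uppercased element of parity k-1
def pvRowU (k : Nat) : List String :=
  pvRow (k - 1) ++ [if (k - 1) % 2 = 0 then "LOVES ME" else "LOVES ME NOT"]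

lemma pvRow_A (k : Nat) :
    (PySem.List.pyRange 0 (k : Int) 1).foldl
      (fun acc i =>
        if PySem.Int.mod i 2 = 0 then acc ++ ["Loves me"] else acc ++ ["Loves me not"]) []
      = pvRow k := by
  have h : (fun (acc : List String) (i : Int) =>
        if PySem.Int.mod i 2 = 0 then acc ++ ["Loves me"] else acc ++ ["Loves me not"])
      = fun acc i => acc ++ [if PySem.Int.mod i 2 = 0 then "Loves me" else "Loves me not"] := by
    funext acc i; split <;> rfl
  rw [h, PySem.List.foldl_append_singleton_eq_map, PySem.List.pyRange_zero_nat, List.map_map]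
  unfold pvRow
  refine List.map_congr_left ?_
  intro j hj
  simp only [Function.comp_apply]
  rw [PySem.Int.mod_eq_emod_of_pos (by norm_num)]
  have hiff : ((j : Int) % 2 = 0) ↔ (j % 2 = 0) := by omega
  by_cases hp : j % 2 = 0 <;> simp [hp, hiff]

lemma pvRow_snoc (j : Nat) :
    pvRow (j + 1) = pvRow j ++ [if j % 2 = 0 then "Loves me" else "Loves me not"] := by
  simp [pvRow, List.range_succ]

lemma pySetD_append_neg_one {α : Type} (xs : List α) (x v : α) :
    PySem.List.pySetD (xs ++ [x]) (-1) v = xs ++ [v] := by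
  simp [PySem.List.pySetD, PySem.List.pySet?, PySem.List.pyIdx?]

-- A reduces to the closed form
lemma loves_me_eq_pvRowU (k : Nat) (hk : 1 ≤ k) :
    loves_me (k : Int) = pvRowU k := by
  obtain ⟨j, rfl⟩ : ∃ j, k = j + 1 := ⟨k - 1, by omega⟩
  unfold loves_me
  simp only [pvRow_A]
  rw [pvRow_snoc, PySem.List.pyGetD_neg_one_append_singleton, pySetD_append_neg_one]
  unfold pvRowU
  simp only [Nat.add_sub_cancel]
  by_cases hp : j % 2 = 0 <;> simp [hp] <;> decide

lemma pvRow_succ_succ (j : Nat) :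
    pvRow (j + 2) = "Loves me" :: "Loves me not" :: pvRow j := by
  simp only [pvRow, show j + 2 = 2 + j from by omega, List.range_add, List.map_append,
    List.map_map]
  have h0 : List.map (fun j => if j % 2 = 0 then "Loves me" else "Loves me not")
      (List.range 2) = ["Loves me", "Loves me not"] := by rfl
  rw [h0]
  simp only [List.cons_append, List.nil_append]
  congr 2
  refine List.map_congr_left ?_
  intro i _
  simp only [Function.comp_apply]
  have h2 : (2 + i) % 2 = i % 2 := by omega
  rw [h2]

-- the pair-peeling loop's invariant: it strips even-length alternating prefixes
lemma pvAltLoop_spec (k : Nat) (hk : 1 ≤ k) (out : List String) :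
    pvAltLoop (k : Int) out
      = (out ++ pvRow (k - (if k % 2 = 0 then 2 else 1)),
         (if k % 2 = 0 then (2 : Int) else 1)) := by
  induction k using Nat.strong_induction_on generalizing out with
  | _ k ih =>
    match k, hk with
    | 1, _ => rw [pvAltLoop]; norm_num [pvRow]
    | 2, _ => rw [pvAltLoop]; norm_num [pvRow]
    | (j + 3), _ =>
      rw [pvAltLoop, if_pos (by omega : (2 : Int) < ((j + 3 : Nat) : Int))]
      have hc : ((j + 3 : Nat) : Int) - 2 = ((j + 1 : Nat) : Int) := by push_cast; ring
      rw [hc, ih (j + 1) (by omega) (by omega)]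
      have hpar : (j + 3) % 2 = (j + 1) % 2 := by omega
      rw [hpar]
      by_cases hp : (j + 1) % 2 = 0
      · rw [if_pos hp, if_pos hp]
        have h2 : j + 3 - 2 = (j + 1 - 2) + 2 := by omega
        rw [h2, pvRow_succ_succ]
        simp
      · rw [if_neg hp, if_neg hp]
        have h2 : j + 3 - 1 = (j + 1 - 1) + 2 := by omega
        rw [h2, pvRow_succ_succ]
        simp

-- B reduces to the same closed form
lemma loves_me_alt_eq_pvRowU (k : Nat) (hk : 1 ≤ k) :
    loves_me_alt (k : Int) = pvRowU k := by
  unfold loves_me_alt pvRowU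
  rw [pvAltLoop_spec k hk]
  by_cases hp : k % 2 = 0
  · simp only [if_pos hp]
    rw [if_neg (show ¬ (2 : Int) = 1 by norm_num)]
    have h1 : k - 1 = (k - 2) + 1 := by omega
    rw [h1, pvRow_snoc, if_pos (show (k - 2) % 2 = 0 by omega),
        if_neg (show ¬ ((k - 2) + 1) % 2 = 0 by omega)]
    simp
  · simp only [if_neg hp]
    rw [if_pos (show (k - 1) % 2 = 0 by omega)]
    simp

-- ===== VERDICT (by name: the statement is the Claim_ definition above) =====
theorem loves_me_spec : Claim_equal_loves_me := by
  intro n _ hpre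
  unfold Pre_loves_me at hpre
  obtain ⟨k, rfl⟩ : ∃ k : Nat, n = (k : Int) := ⟨n.toNat, by omega⟩
  unfold Spec_loves_me
  rw [loves_me_eq_pvRowU k (by omega), loves_me_alt_eq_pvRowU k (by omega)]
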